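-- pv_equiv track=rewrite | github.com/YasinKaryagdi/Thesis | model/statistics.py | calc_kendall_tau
-- ===== SOURCE A (Python) =====
-- def calc_kendall_tau(x, y):
--     discordant_pairs = 0
--
--     for i in range(0, len(x)):
--         for j in range(i + 1, len(x)):
--             a = x[i] - x[j]
--             b = y[i] - y[j]
--
--             # If discordant (different signs)
--             if a * b < 0:
--                 discordant_pairs += 1
--
--     return discordant_pairs
-- ===== SOURCE B (Python) =====
-- def calc_kendall_tau(x, y):
--     # Sort the points lexicographically by (x, y); discordant pairs are then
--     # exactly the strict inversions of the y-sequence, counted by merge sort.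
--     pts = sorted(zip(x, y))
--     ys = [p[1] for p in pts]
--
--     def msort(a):
--         # returns (a sorted ascending, number of strict inversions in a)
--         n = len(a)
--         if n <= 1:
--             return a, 0
--         left, inv_l = msort(a[:n // 2])
--         right, inv_r = msort(a[n // 2:])
--         merged = []
--         inv = inv_l + inv_r
--         i = j = 0
--         while i < len(left) and j < len(right):
--             if left[i] <= right[j]:
--                 merged.append(left[i])
--                 i += 1
--             else:
--                 inv += len(left) - i
--                 merged.append(right[j])
--                 j += 1
--         merged.extend(left[i:])
--         merged.extend(right[j:])
--         return merged, inv
--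
--     return msort(ys)[1]
-- ===== Notes on version B (the rewrite author's own statement) =====
-- stated objective: faster
-- what changed: Replaces the quadratic double loop over index pairs by sorting the points lexicographically and counting strict y-inversions with a merge sort.
import Mathlib
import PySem

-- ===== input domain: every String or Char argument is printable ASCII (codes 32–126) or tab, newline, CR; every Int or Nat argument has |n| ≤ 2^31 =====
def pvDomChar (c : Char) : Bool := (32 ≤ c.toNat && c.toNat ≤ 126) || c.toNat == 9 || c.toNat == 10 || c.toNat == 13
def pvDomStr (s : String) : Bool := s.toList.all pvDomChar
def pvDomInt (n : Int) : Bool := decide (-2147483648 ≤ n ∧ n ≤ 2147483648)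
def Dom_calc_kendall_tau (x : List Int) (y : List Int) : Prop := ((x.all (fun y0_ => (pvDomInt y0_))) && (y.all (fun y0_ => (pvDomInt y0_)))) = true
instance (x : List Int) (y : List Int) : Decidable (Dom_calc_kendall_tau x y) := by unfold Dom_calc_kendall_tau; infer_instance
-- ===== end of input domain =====

-- B sorts the points lexicographically and counts strict y-inversions with a merge sort
-- (O(n log n)) instead of A's double loop over all index pairs (O(n^2)).

-- ===== PORT A =====
def calc_kendall_tau (x : List Int) (y : List Int) : Int :=
  (PySem.List.pyRange 0 x.length 1).foldl (fun acc i =>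
    (PySem.List.pyRange (i + 1) x.length 1).foldl (fun acc2 j =>
      let a := PySem.List.pyGetD x i 0 - PySem.List.pyGetD x j 0
      let b := PySem.List.pyGetD y i 0 - PySem.List.pyGetD y j 0
      if a * b < 0 then acc2 + 1 else acc2) acc) 0

-- ===== PORT B =====
-- the merge phase of Source B's msort: merges two lists, counting (left element, smaller
-- right element) pairs: 'inv += len(left) - i' is the length of the remaining left part
def pvMerge : List Int → List Int → List Int × Nat
  | [], r => (r, 0)
  | a :: l, [] => (a :: l, 0)
  | a :: l, b :: r =>
    if a ≤ b then
      let m := pvMerge l (b :: r)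
      (a :: m.1, m.2)
    else
      let m := pvMerge (a :: l) r
      (b :: m.1, m.2 + (a :: l).length)
  termination_by l r => l.length + r.length

-- Source B's msort: returns (sorted list, strict inversion count); a[:n//2] / a[n//2:] are
-- take/drop at n//2 (n ≥ 0, so Python's n//2 is Nat division)
def pvMsort (a : List Int) : List Int × Nat :=
  if _h : a.length ≤ 1 then (a, 0)
  else
    let k := a.length / 2
    let L := pvMsort (a.take k)
    let R := pvMsort (a.drop k)
    let M := pvMerge L.1 R.1
    (M.1, L.2 + R.2 + M.2)
  termination_by a.length
  decreasing_by
  · simp only [List.length_take]; omega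
  · simp only [List.length_drop]; omega

def calc_kendall_tau_alt (x : List Int) (y : List Int) : Int :=
  let pts := PySem.List.sorted2 (x.zip y) Prod.fst Prod.snd
  let ys := pts.map (fun p => p.2)
  ((pvMsort ys).2 : Int)

-- ===== PRECONDITION & SPEC =====
-- Pre_ excludes exactly the inputs where A raises IndexError (y shorter than x while the
-- inner loop runs, i.e. len(x) ≥ 2): there A returns nothing.
def Pre_calc_kendall_tau (x : List Int) (y : List Int) : Prop :=
  x.length ≤ y.length ∨ x.length ≤ 1
instance (x : List Int) (y : List Int) : Decidable (Pre_calc_kendall_tau x y) := by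
  unfold Pre_calc_kendall_tau; infer_instance

def pvWitness_calc_kendall_tau : List Int × List Int := ([1, 2, 3], [2, 1, 3])

def Spec_calc_kendall_tau (x : List Int) (y : List Int) (out : Int) : Prop := out = calc_kendall_tau_alt x y
instance (x : List Int) (y : List Int) (out : Int) : Decidable (Spec_calc_kendall_tau x y out) := by unfold Spec_calc_kendall_tau; infer_instance

-- ===== CLAIM (what is proved, stated in full; the proofs are below) =====
def Claim_equal_calc_kendall_tau : Prop := ∀ (x : List Int) (y : List Int), Dom_calc_kendall_tau x y → Pre_calc_kendall_tau x y → Spec_calc_kendall_tau x y (calc_kendall_tau x y)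

-- ===== LEMMAS AND PROOFS =====

-- the discordance test, as a Bool on a pair of points
def pvCond (p q : Int × Int) : Bool := decide ((p.1 - q.1) * (p.2 - q.2) < 0)

-- discordant pairs of a list of points (each unordered pair once)
def pvDisc : List (Int × Int) → Nat
  | [] => 0
  | p :: t => t.countP (pvCond p) + pvDisc t

-- strict inversions of an integer sequence
def pvInv : List Int → Nat
  | [] => 0
  | b :: t => t.countP (fun c => decide (c < b)) + pvInv t

-- cross inversions between two blocks
def pvCross : List Int → List Int → Nat
  | [], _ => 0
  | a :: l, r => r.countP (fun c => decide (c < a)) + pvCross l r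

-- lexicographic ≤ on points, and sorted2's strict 'before' test
def pvLexLe (p q : Int × Int) : Prop := p.1 < q.1 ∨ (p.1 = q.1 ∧ p.2 ≤ q.2)
def pvBLt (p q : Int × Int) : Bool :=
  decide (p.1 < q.1) || (!decide (q.1 < p.1) && decide (p.2 < q.2))

lemma pvBLt_iff (p q : Int × Int) : pvBLt p q = true ↔ (p.1 < q.1 ∨ (¬ q.1 < p.1 ∧ p.2 < q.2)) := by
  simp [pvBLt]

lemma pvCond_symm (p q : Int × Int) : pvCond p q = pvCond q p := by
  have h : (p.1 - q.1) * (p.2 - q.2) = (q.1 - p.1) * (q.2 - p.2) := by ring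
  simp only [pvCond, h]

lemma pvDisc_perm {l l' : List (Int × Int)} (h : l.Perm l') : pvDisc l = pvDisc l' := by
  induction h with
  | nil => rfl
  | cons a _ ih => simp [pvDisc, ih, (by assumption : _root_.List.Perm _ _).countP_eq]
  | swap a b t =>
      simp only [pvDisc, List.countP_cons, pvCond_symm a b]
      omega
  | trans _ _ ih1 ih2 => exact ih1.trans ih2

-- ==== A equals pvDisc of the zipped list ====

lemma pvInner (x y : List Int) (h : x.length ≤ y.length) (p : Int × Int) (j : Nat) (acc : Int) :
    (PySem.List.pyRange (j : Int) x.length 1).foldl (fun acc2 k =>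
      if (p.1 - PySem.List.pyGetD x k 0) * (p.2 - PySem.List.pyGetD y k 0) < 0 then acc2 + 1 else acc2) acc
    = acc + (((x.zip y).drop j).countP (pvCond p) : Int) := by
  have hzlen : (x.zip y).length = x.length := by simp [List.length_zip]; omega
  obtain ⟨fuel, hf⟩ : ∃ f, x.length - j = f := ⟨_, rfl⟩
  induction fuel generalizing j acc with
  | zero =>
      have hj : x.length ≤ j := by omega
      rw [PySem.List.pyRange_one_eq_nil (by exact_mod_cast hj)]
      rw [List.drop_eq_nil_of_le (by omega)]
      simp
  | succ f ih =>
      have hj : j < x.length := by omega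
      rw [PySem.List.pyRange_one_cons (by exact_mod_cast hj)]
      rw [List.foldl_cons]
      have hgx : PySem.List.pyGetD x (j : Int) 0 = x[j] := by
        rw [PySem.List.pyGetD_natCast, List.getD_eq_getElem x 0 hj]
      have hgy : PySem.List.pyGetD y (j : Int) 0 = y[j]'(by omega) := by
        rw [PySem.List.pyGetD_natCast, List.getD_eq_getElem y 0 (by omega)]
      have hdrop : (x.zip y).drop j = (x[j], y[j]'(by omega)) :: (x.zip y).drop (j+1) := by
        rw [List.drop_eq_getElem_cons (by omega)]
        congr 1
        exact List.getElem_zip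
      have := ih (j + 1) (if (p.1 - x[j]) * (p.2 - y[j]'(by omega)) < 0 then acc + 1 else acc) (by omega)
      push_cast at this ⊢
      rw [hgx, hgy, this, hdrop]
      rw [List.countP_cons]
      simp only [pvCond, decide_eq_true_eq]
      split_ifs with hc <;> push_cast <;> omega

lemma pvOuter (x y : List Int) (h : x.length ≤ y.length) (j : Nat) (acc : Int) :
    (PySem.List.pyRange (j : Int) x.length 1).foldl (fun acc i =>
      (PySem.List.pyRange (i + 1) x.length 1).foldl (fun acc2 k =>
        if (PySem.List.pyGetD x i 0 - PySem.List.pyGetD x k 0) * (PySem.List.pyGetD y i 0 - PySem.List.pyGetD y k 0) < 0 then acc2 + 1 else acc2) acc) acc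
    = acc + ((pvDisc ((x.zip y).drop j)) : Int) := by
  obtain ⟨fuel, hf⟩ : ∃ f, x.length - j = f := ⟨_, rfl⟩
  induction fuel generalizing j acc with
  | zero =>
      have hj : x.length ≤ j := by omega
      rw [PySem.List.pyRange_one_eq_nil (by exact_mod_cast hj)]
      rw [List.drop_eq_nil_of_le (by simp [List.length_zip]; omega)]
      simp [pvDisc]
  | succ f ih =>
      have hj : j < x.length := by omega
      rw [PySem.List.pyRange_one_cons (by exact_mod_cast hj)]
      rw [List.foldl_cons]
      have hgx : PySem.List.pyGetD x (j : Int) 0 = x[j] := by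
        rw [PySem.List.pyGetD_natCast, List.getD_eq_getElem x 0 hj]
      have hgy : PySem.List.pyGetD y (j : Int) 0 = y[j]'(by omega) := by
        rw [PySem.List.pyGetD_natCast, List.getD_eq_getElem y 0 (by omega)]
      simp only [hgx, hgy]
      have hin := pvInner x y h (x[j], y[j]'(by omega)) (j + 1) acc
      push_cast at hin
      rw [hin]
      have hrec := ih (j + 1) (acc + (List.countP (pvCond (x[j], y[j]'(by omega))) ((x.zip y).drop (j + 1)) : Int)) (by omega)
      push_cast at hrec
      rw [hrec]
      have hdrop : (x.zip y).drop j = (x[j], y[j]'(by omega)) :: (x.zip y).drop (j+1) := by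
        rw [List.drop_eq_getElem_cons (by simp [List.length_zip]; omega)]
        congr 1
        exact List.getElem_zip
      rw [hdrop]
      simp only [pvDisc]
      push_cast
      ring

lemma pvA_eq_disc (x y : List Int) (h : x.length ≤ y.length) :
    calc_kendall_tau x y = (pvDisc (x.zip y) : Int) := by
  have := pvOuter x y h 0 0
  push_cast at this
  simpa [calc_kendall_tau] using this

-- ==== sorted2's output is Pairwise pvLexLe ====

lemma pvLexLe_of_not_bLt {p q : Int × Int} (h : ¬ pvBLt q p = true) : pvLexLe p q := by
  rw [pvBLt_iff] at h; unfold pvLexLe; omega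

lemma pvLexLe_of_bLt {p q : Int × Int} (h : pvBLt p q = true) : pvLexLe p q := by
  rw [pvBLt_iff] at h; unfold pvLexLe; omega

lemma pvLexLe_trans {p q r : Int × Int} (h1 : pvLexLe p q) (h2 : pvLexLe q r) : pvLexLe p r := by
  unfold pvLexLe at *; omega

lemma pvInsertBy_pairwise (x : Int × Int) (ys : List (Int × Int)) (h : ys.Pairwise pvLexLe) :
    (PySem.List.insertBy pvBLt x ys).Pairwise pvLexLe := by
  induction ys with
  | nil => simp [PySem.List.insertBy]
  | cons y ys ih =>
      rcases List.pairwise_cons.mp h with ⟨hy, hys⟩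
      rw [PySem.List.insertBy]
      by_cases hb : pvBLt x y = true
      · simp only [hb, if_true]
        refine List.pairwise_cons.mpr ⟨?_, h⟩
        intro z hz
        rcases List.mem_cons.mp hz with rfl | hz'
        · exact pvLexLe_of_bLt hb
        · exact pvLexLe_trans (pvLexLe_of_bLt hb) (hy z hz')
      · simp only [hb, Bool.false_eq_true, if_false]
        refine List.pairwise_cons.mpr ⟨?_, ih hys⟩
        intro z hz
        rcases (PySem.List.mem_insertBy pvBLt x z ys).mp hz with rfl | hz'
        · exact pvLexLe_of_not_bLt hb
        · exact hy z hz'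

lemma pvSorted2_pairwise (z : List (Int × Int)) :
    (PySem.List.sorted2 z Prod.fst Prod.snd).Pairwise pvLexLe := by
  show (z.foldl (fun acc x => PySem.List.insertBy pvBLt x acc) []).Pairwise pvLexLe
  have : ∀ (z : List (Int × Int)) (acc : List (Int × Int)), acc.Pairwise pvLexLe →
      (z.foldl (fun acc x => PySem.List.insertBy pvBLt x acc) acc).Pairwise pvLexLe := by
    intro z
    induction z with
    | nil => intro acc h; exact h
    | cons p z ih => intro acc h; exact ih _ (pvInsertBy_pairwise p acc h)
  exact this z [] (List.Pairwise.nil)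

-- ==== on a lex-sorted list, discordance is y-inversion ====

lemma pvCond_of_lexLe {p q : Int × Int} (h : pvLexLe p q) :
    pvCond p q = decide (q.2 < p.2) := by
  rcases h with h1 | ⟨h1, h2⟩
  · have ha : p.1 - q.1 < 0 := by omega
    simp only [pvCond]
    congr 1
    apply propext
    constructor
    · intro hlt
      by_contra hle
      push Not at hle
      nlinarith
    · intro hgt
      have : 0 < p.2 - q.2 := by omega
      nlinarith
  · simp only [pvCond, h1]
    simp
    omega

lemma pvDisc_eq_inv {s : List (Int × Int)} (h : s.Pairwise pvLexLe) :
    pvDisc s = pvInv (s.map (fun p => p.2)) := by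
  induction s with
  | nil => rfl
  | cons p t ih =>
      rcases List.pairwise_cons.mp h with ⟨hp, ht⟩
      simp only [pvDisc, List.map_cons, pvInv, List.countP_map]
      rw [ih ht]
      congr 1
      apply List.countP_congr
      intro q hq
      simp only [Function.comp]
      rw [pvCond_of_lexLe (hp q hq)]

-- ==== merge sort counts inversions ====

lemma pvCross_nil_right (l : List Int) : pvCross l [] = 0 := by
  induction l with
  | nil => rfl
  | cons a l ih => simp [pvCross, ih]

lemma pvCross_cons_right (l : List Int) (b : Int) (r : List Int) :
    pvCross l (b :: r) = l.countP (fun p => decide (b < p)) + pvCross l r := by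
  induction l with
  | nil => rfl
  | cons a l ih => simp only [pvCross, List.countP_cons, ih]; omega

lemma pvCross_perm_left {l l' : List Int} (r : List Int) (h : l.Perm l') :
    pvCross l r = pvCross l' r := by
  induction h with
  | nil => rfl
  | cons a _ ih => simp [pvCross, ih]
  | swap a b t => simp only [pvCross]; omega
  | trans _ _ ih1 ih2 => exact ih1.trans ih2

lemma pvCross_perm_right (l : List Int) {r r' : List Int} (h : r.Perm r') :
    pvCross l r = pvCross l r' := by
  induction l with
  | nil => rfl
  | cons a l ih => simp [pvCross, ih, h.countP_eq]

lemma pvInv_append (l r : List Int) :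
    pvInv (l ++ r) = pvInv l + pvInv r + pvCross l r := by
  induction l with
  | nil => simp [pvInv, pvCross]
  | cons a l ih => simp only [List.cons_append, pvInv, pvCross, List.countP_append, ih]; omega

lemma pvMerge_spec : ∀ (L R : List Int), L.Pairwise (· ≤ ·) → R.Pairwise (· ≤ ·) →
    (pvMerge L R).1.Perm (L ++ R) ∧ (pvMerge L R).1.Pairwise (· ≤ ·) ∧ (pvMerge L R).2 = pvCross L R := by
  intro L R hL hR
  fun_induction pvMerge L R with
  | case1 r => simpa [pvCross] using hR
  | case2 a l => simpa [pvCross_nil_right] using hL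
  | case3 a l b r hab m ih =>
      rcases List.pairwise_cons.mp hL with ⟨ha, hl⟩
      rcases List.pairwise_cons.mp hR with ⟨hb, hr⟩
      obtain ⟨hperm, hpw, hcnt⟩ := ih hl hR
      refine ⟨hperm.cons a, ?_, ?_⟩
      · refine List.pairwise_cons.mpr ⟨?_, hpw⟩
        intro z hz
        rcases List.mem_append.mp (hperm.mem_iff.mp hz) with hz' | hz'
        · exact ha z hz'
        · rcases List.mem_cons.mp hz' with rfl | hz''
          · exact hab
          · exact le_trans hab (hb z hz'')
      · show m.2 = pvCross (a :: l) (b :: r)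
        rw [hcnt]
        have hz : (b :: r).countP (fun c => decide (c < a)) = 0 := by
          rw [List.countP_eq_zero]
          intro z hz
          rcases List.mem_cons.mp hz with rfl | hz'
          · simpa using by omega
          · have := hb z hz'
            simpa using by omega
        simp only [pvCross, hz, Nat.zero_add]
  | case4 a l b r hab m ih =>
      rcases List.pairwise_cons.mp hR with ⟨hb, hr⟩
      obtain ⟨hperm, hpw, hcnt⟩ := ih hL hr
      push Not at hab
      refine ⟨?_, ?_, ?_⟩
      · exact (hperm.cons b).trans (List.perm_middle).symm
      · refine List.pairwise_cons.mpr ⟨?_, hpw⟩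
        intro z hz
        rcases List.mem_append.mp (hperm.mem_iff.mp hz) with hz' | hz'
        · rcases List.mem_cons.mp hz' with rfl | hz''
          · omega
          · have := (List.pairwise_cons.mp hL).1 z hz''
            omega
        · exact hb z hz'
      · show m.2 + (a :: l).length = pvCross (a :: l) (b :: r)
        rw [hcnt, pvCross_cons_right]
        have hlen : (a :: l).countP (fun p => decide (b < p)) = (a :: l).length := by
          rw [List.countP_eq_length]
          intro z hz
          rcases List.mem_cons.mp hz with rfl | hz'
          · simpa using by omega
          · have := (List.pairwise_cons.mp hL).1 z hz'
            simpa using by omega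
        omega

lemma pvMsort_spec : ∀ (a : List Int),
    (pvMsort a).1.Perm a ∧ (pvMsort a).1.Pairwise (· ≤ ·) ∧ (pvMsort a).2 = pvInv a := by
  intro a
  fun_induction pvMsort a with
  | case1 a h =>
      refine ⟨List.Perm.refl a, ?_, ?_⟩
      · match a, h with
        | [], _ => exact List.Pairwise.nil
        | [x], _ => simp
      · match a, h with
        | [], _ => rfl
        | [x], _ => rfl
  | case2 a h k L R M ih1 ih2 =>
      obtain ⟨pL, wL, cL⟩ := ih1
      obtain ⟨pR, wR, cR⟩ := ih2
      obtain ⟨pM, wM, cM⟩ := pvMerge_spec (pvMsort (a.take k)).1 (pvMsort (a.drop k)).1 wL wR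
      refine ⟨?_, wM, ?_⟩
      · exact pM.trans ((pL.append pR).trans (by rw [List.take_append_drop]))
      · show L.2 + R.2 + M.2 = pvInv a
        show (pvMsort (a.take k)).2 + (pvMsort (a.drop k)).2 + (pvMerge (pvMsort (a.take k)).1 (pvMsort (a.drop k)).1).2 = pvInv a
        rw [cM, cL, cR]
        rw [pvCross_perm_left (pvMsort (a.drop k)).1 pL, pvCross_perm_right _ pR]
        have hsplit : pvInv a = pvInv (a.take k ++ a.drop k) := by rw [List.take_append_drop]
        rw [hsplit, pvInv_append]

-- ===== VERDICT (by name: the statement is the Claim_ definition above) =====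
theorem calc_kendall_tau_spec : Claim_equal_calc_kendall_tau := by
  intro x y _ hpre
  show calc_kendall_tau x y = calc_kendall_tau_alt x y
  by_cases hlen : x.length ≤ y.length
  · rw [pvA_eq_disc x y hlen]
    have hperm : (PySem.List.sorted2 (x.zip y) Prod.fst Prod.snd).Perm (x.zip y) :=
      PySem.List.sorted2_perm (x.zip y) Prod.fst Prod.snd false
    have h1 : pvDisc (x.zip y) = pvDisc (PySem.List.sorted2 (x.zip y) Prod.fst Prod.snd) :=
      pvDisc_perm hperm.symm
    have h2 := pvDisc_eq_inv (pvSorted2_pairwise (x.zip y))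
    have h3 := (pvMsort_spec ((PySem.List.sorted2 (x.zip y) Prod.fst Prod.snd).map (fun p => p.2))).2.2
    show _ = ((pvMsort ((PySem.List.sorted2 (x.zip y) Prod.fst Prod.snd).map (fun p => p.2))).2 : Int)
    rw [h1, h2, h3]
  · rcases hpre with hpre | hx1
    · exact absurd hpre hlen
    · -- y is shorter than x and x has at most one element: x = [a], y = []
      match x, y, hx1, hlen with
      | [], y, _, hlen => exact absurd (by simp) hlen
      | [a], b :: y, _, hlen => exact absurd (by simp) hlen
      | [a], [], _, _ =>
          show calc_kendall_tau [a] [] = ((pvMsort _).2 : Int)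
          rw [pvMsort]
          norm_num [calc_kendall_tau, PySem.List.pyRange_one_cons (by norm_num : (0:Int) < 1),
            PySem.List.pyRange_one_eq_nil (by norm_num : (1:Int) ≤ 1), PySem.List.sorted2,
            PySem.List.insertBy]
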